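-- pv_equiv track=rewrite | github.com/PigeonDan1/ps-slm | ps-ctc/utils.py | gen_ctc_peak_time
-- ===== SOURCE A (Python) =====
-- from typing import List, Tuple
-- from typing import List, Tuple
--
-- def gen_ctc_peak_time(hyp: List[int], blank_id: int = 0) -> List[int]:
--     times = []
--     cur = 0
--     while cur < len(hyp):
--         if hyp[cur] != blank_id:
--             times.append(cur)
--         prev = cur
--         while cur < len(hyp) and hyp[cur] == hyp[prev]:
--             cur += 1
--     return times
-- ===== SOURCE B (Python) =====
-- def gen_ctc_peak_time(hyp, blank_id=0):
--     times = []
--     prev = None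
--     for i, v in enumerate(hyp):
--         if v != blank_id and v != prev:
--             times.append(i)
--         prev = v
--     return times
-- ===== Notes on version B (the rewrite author's own statement) =====
-- stated objective: simpler
-- what changed: Replaced the nested while loops with manual run-skipping pointers by a flat single pass that appends i whenever the element is non-blank and differs from its predecessor.
import Mathlib
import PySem

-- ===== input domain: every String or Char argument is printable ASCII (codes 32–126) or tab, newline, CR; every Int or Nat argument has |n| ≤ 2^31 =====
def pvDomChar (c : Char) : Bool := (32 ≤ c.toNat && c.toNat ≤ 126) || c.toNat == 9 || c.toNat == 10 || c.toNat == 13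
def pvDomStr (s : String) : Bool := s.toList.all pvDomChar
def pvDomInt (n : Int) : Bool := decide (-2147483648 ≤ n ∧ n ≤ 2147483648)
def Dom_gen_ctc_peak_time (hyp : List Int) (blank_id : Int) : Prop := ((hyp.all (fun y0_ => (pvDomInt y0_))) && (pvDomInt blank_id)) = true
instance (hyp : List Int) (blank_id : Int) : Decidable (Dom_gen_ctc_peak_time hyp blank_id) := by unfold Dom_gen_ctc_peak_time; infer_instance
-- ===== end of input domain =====

-- B replaces A's nested run-skipping pointer loops by one flat pass comparing each
-- element with its predecessor (objective: simpler; same O(n) cost).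

-- ===== PORT A =====
-- inner while loop: `while cur < len(hyp) and hyp[cur] == hyp[prev]: cur += 1`.
-- hyp[prev] is the fixed pivot value read at loop entry; indices are guarded in
-- range, so List.getD is exact for Python's hyp[cur]. The fuel argument only
-- makes the same computation total: len(hyp) - cur steps always suffice, since
-- cur grows by 1 per step and the loop stops at cur = len(hyp) regardless.
def skipRun (hyp : List Int) (pivot : Int) : Nat → Nat → Nat
  | 0, cur => cur
  | fuel + 1, cur =>
      if cur < hyp.length ∧ hyp.getD cur 0 = pivot then skipRun hyp pivot fuel (cur + 1)
      else cur

-- outer while loop of A, state (cur, times); fuel len(hyp)+1 suffices since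
-- every iteration advances cur by at least 1
def aLoop (hyp : List Int) (blank_id : Int) : Nat → Nat → List Int → List Int
  | 0, _, times => times
  | fuel + 1, cur, times =>
      if cur < hyp.length then
        let times' := if hyp.getD cur 0 ≠ blank_id then times ++ [(cur : Int)] else times
        aLoop hyp blank_id fuel (skipRun hyp (hyp.getD cur 0) (hyp.length - cur) cur) times'
      else times

def gen_ctc_peak_time (hyp : List Int) (blank_id : Int) : List Int :=
  aLoop hyp blank_id (hyp.length + 1) 0 []

-- ===== PORT B =====
-- B's for loop, state (prev, i); Python's `v != prev` with prev initially None
-- is `some v ≠ prev` here (always true while prev = none, as in Python).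
def altGo (blank_id : Int) (prev : Option Int) (i : Int) : List Int → List Int
  | [] => []
  | v :: rest =>
      (if v ≠ blank_id ∧ some v ≠ prev then [i] else []) ++ altGo blank_id (some v) (i + 1) rest

def gen_ctc_peak_time_alt (hyp : List Int) (blank_id : Int) : List Int :=
  altGo blank_id none 0 hyp

-- ===== PRECONDITION & SPEC =====
def Spec_gen_ctc_peak_time (hyp : List Int) (blank_id : Int) (out : List Int) : Prop := out = gen_ctc_peak_time_alt hyp blank_id
instance (hyp : List Int) (blank_id : Int) (out : List Int) : Decidable (Spec_gen_ctc_peak_time hyp blank_id out) := by unfold Spec_gen_ctc_peak_time; infer_instance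

-- ===== CLAIM (what is proved, stated in full; the proofs are below) =====
def Claim_equal_gen_ctc_peak_time : Prop := ∀ (hyp : List Int) (blank_id : Int), Dom_gen_ctc_peak_time hyp blank_id → Spec_gen_ctc_peak_time hyp blank_id (gen_ctc_peak_time hyp blank_id)

-- ===== LEMMAS AND PROOFS =====

-- Main invariant, by strong induction on the remaining length k = len - cur:
-- (1) from any position cur (with enough fuel), A's outer loop produces B's flat
--     scan of the suffix with no predecessor recorded;
-- (2) resuming A's outer loop after skipping a `pivot` run from cur produces
--     B's flat scan of the suffix with predecessor `pivot`.
theorem loop_main (hyp : List Int) (blank_id : Int) :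
    ∀ k cur, hyp.length - cur = k →
      (∀ fuel times, k < fuel →
          aLoop hyp blank_id fuel cur times = times ++ altGo blank_id none (cur : Int) (hyp.drop cur)) ∧
      (∀ pivot sfuel fuel times, k ≤ sfuel → k < fuel →
          aLoop hyp blank_id fuel (skipRun hyp pivot sfuel cur) times
            = times ++ altGo blank_id (some pivot) (cur : Int) (hyp.drop cur)) := by
  intro k
  induction k using Nat.strong_induction_on with
  | _ k ih =>
    intro cur hk
    by_cases h : cur < hyp.length
    · have hk1 : 1 ≤ k := by omega
      have hd : hyp.drop cur = hyp[cur] :: hyp.drop (cur + 1) := List.drop_eq_getElem_cons h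
      have hg : hyp.getD cur 0 = hyp[cur] := List.getD_eq_getElem hyp 0 h
      have ih' := ih (k - 1) (by omega) (cur + 1) (by omega)
      have hL1 : ∀ fuel times, k < fuel →
          aLoop hyp blank_id fuel cur times = times ++ altGo blank_id none (cur : Int) (hyp.drop cur) := by
        intro fuel times hf
        obtain ⟨f, rfl⟩ : ∃ f, fuel = f + 1 := ⟨fuel - 1, by omega⟩
        show (if cur < hyp.length then _ else times) = _
        rw [if_pos h]
        have hsk : skipRun hyp (hyp.getD cur 0) (hyp.length - cur) cur
            = skipRun hyp (hyp.getD cur 0) (k - 1) (cur + 1) := by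
          have : hyp.length - cur = (k - 1) + 1 := by omega
          rw [this]
          show (if cur < hyp.length ∧ hyp.getD cur 0 = hyp.getD cur 0 then _ else cur) = _
          rw [if_pos ⟨h, rfl⟩]
        rw [hsk, ih'.2 (hyp.getD cur 0) (k - 1) f _ (le_refl _) (by omega), hd, hg]
        simp only [altGo]
        split_ifs with hb h2 <;> simp_all
      refine ⟨hL1, ?_⟩
      intro pivot sfuel fuel times hs hf
      obtain ⟨s, rfl⟩ : ∃ s, sfuel = s + 1 := ⟨sfuel - 1, by omega⟩
      by_cases hp : hyp.getD cur 0 = pivot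
      · have hsk : skipRun hyp pivot (s + 1) cur = skipRun hyp pivot s (cur + 1) := by
          show (if cur < hyp.length ∧ hyp.getD cur 0 = pivot then _ else cur) = _
          rw [if_pos ⟨h, hp⟩]
        rw [hsk, ih'.2 pivot s fuel _ (by omega) (by omega), hd]
        have hv : hyp[cur] = pivot := hg ▸ hp
        simp [altGo, hv]
      · have hsk : skipRun hyp pivot (s + 1) cur = cur := by
          show (if cur < hyp.length ∧ hyp.getD cur 0 = pivot then _ else cur) = cur
          rw [if_neg (fun hc => hp hc.2)]
        rw [hsk, hL1 fuel times hf, hd]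
        have hv : hyp[cur] ≠ pivot := fun e => hp (hg ▸ e)
        simp only [altGo]
        split_ifs with h1 h2 <;> simp_all
    · have hcur : hyp.length ≤ cur := le_of_not_gt h
      have hd : hyp.drop cur = [] := List.drop_eq_nil_of_le hcur
      constructor
      · intro fuel times hf
        obtain ⟨f, rfl⟩ : ∃ f, fuel = f + 1 := ⟨fuel - 1, by omega⟩
        show (if cur < hyp.length then _ else times) = _
        rw [if_neg h, hd]
        simp [altGo]
      · intro pivot sfuel fuel times _ hf
        have hsk : skipRun hyp pivot sfuel cur = cur := by
          cases sfuel with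
          | zero => rfl
          | succ s =>
              show (if cur < hyp.length ∧ hyp.getD cur 0 = pivot then _ else cur) = cur
              rw [if_neg (fun hc => h hc.1)]
        obtain ⟨f, rfl⟩ : ∃ f, fuel = f + 1 := ⟨fuel - 1, by omega⟩
        rw [hsk]
        show (if cur < hyp.length then _ else times) = _
        rw [if_neg h, hd]
        simp [altGo]

-- ===== VERDICT (by name: the statement is the Claim_ definition above) =====
theorem gen_ctc_peak_time_spec : Claim_equal_gen_ctc_peak_time := by
  intro hyp blank_id _
  show gen_ctc_peak_time hyp blank_id = gen_ctc_peak_time_alt hyp blank_id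
  have h := (loop_main hyp blank_id (hyp.length - 0) 0 rfl).1 (hyp.length + 1) [] (by omega)
  simpa [gen_ctc_peak_time, gen_ctc_peak_time_alt] using h
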